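-- pv_equiv track=rewrite | github.com/gourav2001k/Algorithms-CP | LC-Daily/LC2081.py | convK
-- ===== SOURCE A (Python) =====
-- def convK(x, k):
--     arr = []
--     while x:
--         arr.append(x % k)
--         x //= k
--     n = len(arr)
--     for i in range(n//2):
--         if arr[i] != arr[n-1-i]:
--             return False
--     return True
-- ===== SOURCE B (Python) =====
-- def convK(x, k):
--     rev, t = 0, x
--     while t:
--         rev = rev * k + t % k
--         t //= k
--     return rev == x
-- ===== Notes on version B (the rewrite author's own statement) =====
-- stated objective: simpler
-- what changed: B builds the base-k reversed number arithmetically in a single accumulator loop (rev = rev*k + t%k) and ends with one integer comparison rev == x; no digit list is stored and A's second index-pair palindrome scan disappears.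
import Mathlib
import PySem

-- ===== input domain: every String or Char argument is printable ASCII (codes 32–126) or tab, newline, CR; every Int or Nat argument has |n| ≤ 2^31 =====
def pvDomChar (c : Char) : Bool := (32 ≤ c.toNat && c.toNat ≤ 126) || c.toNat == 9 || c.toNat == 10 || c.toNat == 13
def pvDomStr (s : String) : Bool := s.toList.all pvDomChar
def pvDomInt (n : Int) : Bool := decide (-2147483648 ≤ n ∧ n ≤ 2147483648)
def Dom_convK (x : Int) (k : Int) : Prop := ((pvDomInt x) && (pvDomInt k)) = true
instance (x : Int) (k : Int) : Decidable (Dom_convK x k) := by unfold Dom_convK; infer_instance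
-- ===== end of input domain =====

-- B reverses the number arithmetically in one accumulator loop (rev = rev*k + t%k) and
-- compares rev == x, instead of A's stored digit list plus index-pair palindrome scan.
-- Objective: simpler.


-- ===== PORT A =====
-- `while x:` loop collecting arr = [x%k, ...], run on a fuel counter: 2*|x|+1 units always
-- outlast the loop (each division step lowers 2*|x| + [0<x], see convMu_step below), so on
-- every input the recursion computes exactly A's loop.  The extra k-clauses in the guard
-- only make the loop total: on every input admitted by Pre_convK they coincide with `x != 0`.
def convDigits (fuel : Nat) (x : Int) (k : Int) : List Int :=
  match fuel with
  | 0 => []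
  | fuel + 1 =>
    if (0 < x ∧ 2 ≤ k) ∨ (x ≠ 0 ∧ k ≤ -2) then
      PySem.Int.mod x k :: convDigits fuel (PySem.Int.floordiv x k) k
    else []

-- `for i in range(n//2): if arr[i] != arr[n-1-i]: return False`
def convCheck (arr : List Int) (n : Int) : List Int → Bool
  | [] => true
  | i :: is =>
    if PySem.List.pyGet? arr i ≠ PySem.List.pyGet? arr (n - 1 - i) then false
    else convCheck arr n is

def convK (x : Int) (k : Int) : Bool :=
  let arr := convDigits (2 * x.natAbs + 1) x k
  let n : Int := arr.length
  convCheck arr n (PySem.List.pyRange 0 (PySem.Int.floordiv n 2) 1)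

-- ===== PORT B =====
-- `while t: rev = rev*k + t%k; t //= k` with accumulator rev, run on a fuel counter:
-- 2*|t|+1 units always outlast the loop (each division step lowers 2*|t| + [0<t]), so on every input the recursion computes exactly B's loop.
-- The k-clauses beside `t ≠ 0` in the guard only totalise the loop and coincide with
-- `t != 0` on Pre_convK inputs.
def revLoop (fuel : Nat) (t : Int) (k : Int) (rev : Int) : Int :=
  match fuel with
  | 0 => rev
  | fuel + 1 =>
    if t ≠ 0 ∧ (1 < k ∨ k < -1) ∧ (0 ≤ t ∨ k < 0) then
      revLoop fuel (PySem.Int.floordiv t k) k (rev * k + PySem.Int.mod t k)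
    else rev

def convK_alt (x : Int) (k : Int) : Bool := revLoop (2 * x.natAbs + 1) x k 0 == x

-- ===== PRECONDITION & SPEC =====
-- Pre_ is exactly the set on which the Python A returns: outside it A raises
-- ZeroDivisionError (k = 0, x ≠ 0) or never terminates (k ∈ {-1,1} with x ≠ 0,
-- or x < 0 with k ≥ 2, where x //= k stalls at a nonzero fixed point).
def Pre_convK (x : Int) (k : Int) : Prop := x = 0 ∨ (0 < x ∧ 2 ≤ k) ∨ k ≤ -2
instance (x : Int) (k : Int) : Decidable (Pre_convK x k) := by unfold Pre_convK; infer_instance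

def pvWitness_convK : Int × Int := (121, 10)

def Spec_convK (x : Int) (k : Int) (out : Bool) : Prop := out = convK_alt x k
instance (x : Int) (k : Int) (out : Bool) : Decidable (Spec_convK x k out) := by unfold Spec_convK; infer_instance

-- ===== CLAIM (what is proved, stated in full; the proofs are below) =====
def Claim_equal_convK : Prop := ∀ (x : Int) (k : Int), Dom_convK x k → Pre_convK x k → Spec_convK x k (convK x k)

-- ===== LEMMAS AND PROOFS =====

-- loop measure shared by the fuel analyses: it shrinks at every division step
def convMu (x : Int) : Nat := 2 * x.natAbs + (if 0 < x then 1 else 0)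

theorem convMu_step {x k : Int} (h : (0 < x ∧ 2 ≤ k) ∨ (x ≠ 0 ∧ k ≤ -2)) :
    convMu (PySem.Int.floordiv x k) < convMu x := by
  have hqk := PySem.Int.floordiv_mul_add_mod x k
  set q := PySem.Int.floordiv x k with hq
  set r := PySem.Int.mod x k with hr
  rcases h with ⟨hx, hk⟩ | ⟨hx, hk⟩
  · have h0 : 0 ≤ r := PySem.Int.mod_nonneg x (by omega)
    have h1 : r < k := PySem.Int.mod_lt x (by omega)
    have hq0 : 0 ≤ q := by nlinarith
    have hq2 : 2 * q ≤ x := by nlinarith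
    unfold convMu; split_ifs <;> omega
  · have hb := PySem.Int.mod_neg_bounds x (b := k) (by omega)
    rcases lt_trichotomy x 0 with hx0 | hx0 | hx0
    · have hq0 : 0 ≤ q := by nlinarith
      have hq2 : 2 * q ≤ -x := by nlinarith
      unfold convMu; split_ifs <;> omega
    · omega
    · have hq0 : q < 0 := by nlinarith
      have hq2 : -x ≤ q := by nlinarith
      unfold convMu; split_ifs <;> omega

-- value of a little-endian digit list in base k
def convVal (k : Int) : List Int → Int
  | [] => 0
  | d :: ds => d + k * convVal k ds

theorem convVal_append (k d : Int) (ds : List Int) :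
    convVal k (ds ++ [d]) = convVal k ds + d * k ^ ds.length := by
  induction ds with
  | nil => simp [convVal]
  | cons e es ih => simp [convVal, ih]; ring

-- the digit loop really decomposes x (under Pre_, with enough fuel)
theorem convVal_digits (fuel : Nat) (x k : Int) (hf : convMu x ≤ fuel) (h : Pre_convK x k) :
    convVal k (convDigits fuel x k) = x := by
  induction fuel generalizing x with
  | zero =>
    have hx : x = 0 := by unfold convMu at hf; split_ifs at hf <;> omega
    subst hx
    simp [convDigits, convVal]
  | succ fuel ih =>
    by_cases hg : (0 < x ∧ 2 ≤ k) ∨ (x ≠ 0 ∧ k ≤ -2)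
    · rw [convDigits, if_pos hg]
      have hpre : Pre_convK (PySem.Int.floordiv x k) k := by
        rcases hg with ⟨hx, hk⟩ | ⟨hx, hk⟩
        · have hqk := PySem.Int.floordiv_mul_add_mod x k
          have h0 : 0 ≤ PySem.Int.mod x k := PySem.Int.mod_nonneg x (by omega)
          have h1 : PySem.Int.mod x k < k := PySem.Int.mod_lt x (by omega)
          have hq0 : 0 ≤ PySem.Int.floordiv x k := by nlinarith
          rcases hq0.lt_or_eq with h' | h'
          · exact Or.inr (Or.inl ⟨h', hk⟩)
          · exact Or.inl h'.symm
        · exact Or.inr (Or.inr hk)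
      have hstep := convMu_step hg
      have hqk := PySem.Int.floordiv_mul_add_mod x k
      simp only [convVal, ih _ (by omega) hpre]
      linarith
    · rw [convDigits, if_neg hg]
      unfold Pre_convK at h
      simp only [convVal]
      omega

-- every digit lies in the canonical remainder range of k
theorem convDigits_canonical (fuel : Nat) (x k : Int) (d : Int)
    (hd : d ∈ convDigits fuel x k) :
    (0 < k → 0 ≤ d ∧ d < k) ∧ (k < 0 → k < d ∧ d ≤ 0) := by
  induction fuel generalizing x with
  | zero => simp [convDigits] at hd
  | succ fuel ih =>
    by_cases hg : (0 < x ∧ 2 ≤ k) ∨ (x ≠ 0 ∧ k ≤ -2)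
    · rw [convDigits, if_pos hg] at hd
      rcases List.mem_cons.mp hd with rfl | hmem
      · constructor
        · intro hk
          exact ⟨PySem.Int.mod_nonneg x (by omega), PySem.Int.mod_lt x hk⟩
        · intro hk
          exact PySem.Int.mod_neg_bounds x hk
      · exact ih _ hmem
    · rw [convDigits, if_neg hg] at hd
      simp at hd

-- base-k values are injective on equal-length canonical digit lists
theorem convVal_inj (k : Int) (hk : k ≠ 0) (ds : List Int) :
    ∀ es : List Int, ds.length = es.length →
    (∀ d ∈ ds, (0 < k → 0 ≤ d ∧ d < k) ∧ (k < 0 → k < d ∧ d ≤ 0)) →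
    (∀ e ∈ es, (0 < k → 0 ≤ e ∧ e < k) ∧ (k < 0 → k < e ∧ e ≤ 0)) →
    convVal k ds = convVal k es → ds = es := by
  induction ds with
  | nil => intro es hlen _ _ _; cases es with
    | nil => rfl
    | cons e es => simp at hlen
  | cons d ds ih =>
    intro es hlen hds hes hval
    cases es with
    | nil => simp at hlen
    | cons e es =>
      have hd := hds d (List.mem_cons_self ..)
      have he := hes e (List.mem_cons_self ..)
      have hdvd : k ∣ (d - e) := by
        refine ⟨convVal k es - convVal k ds, ?_⟩
        simp only [convVal] at hval
        linarith
      have hzero : d - e = 0 := by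
        have habs : |d - e| < |k| := by
          rcases lt_or_gt_of_ne hk with hneg | hpos
          · have h1 := hd.2 hneg; have h2 := he.2 hneg
            rw [abs_of_neg hneg, abs_lt]; omega
          · have h1 := hd.1 hpos; have h2 := he.1 hpos
            rw [abs_of_pos hpos, abs_lt]; omega
        exact Int.eq_zero_of_abs_lt_dvd ((abs_dvd k (d - e)).mpr hdvd) habs
      have hde : d = e := by omega
      subst hde
      have htail : convVal k ds = convVal k es := by
        simp only [convVal] at hval
        exact mul_left_cancel₀ hk (by linarith : k * convVal k ds = k * convVal k es)
      have := ih es (by simpa using hlen)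
        (fun a ha => hds a (List.mem_cons_of_mem _ ha))
        (fun a ha => hes a (List.mem_cons_of_mem _ ha)) htail
      rw [this]

-- B's loop is the left fold of A's digit list at the same fuel (the guards are equivalent)
theorem revLoop_eq_foldl (fuel : Nat) (t k rev : Int) :
    revLoop fuel t k rev = (convDigits fuel t k).foldl (fun r d => r * k + d) rev := by
  induction fuel generalizing t rev with
  | zero => rfl
  | succ fuel ih =>
    by_cases hg : t ≠ 0 ∧ (1 < k ∨ k < -1) ∧ (0 ≤ t ∨ k < 0)
    · rw [revLoop, if_pos hg, convDigits, if_pos (by omega)]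
      rw [ih]
      rfl
    · rw [revLoop, if_neg hg, convDigits, if_neg (by omega)]
      rfl

theorem foldl_eq_val_reverse (k : Int) (ds : List Int) (rev : Int) :
    ds.foldl (fun r d => r * k + d) rev = rev * k ^ ds.length + convVal k ds.reverse := by
  induction ds generalizing rev with
  | nil => simp [convVal]
  | cons d ds ih =>
    simp only [List.foldl, List.reverse_cons, ih, convVal_append, List.length_reverse,
      List.length_cons]
    ring

-- A's scan over range(n//2) is the palindrome test
theorem convCheck_eq_all (arr : List Int) (n : Int) (is : List Int) :
    convCheck arr n is =
      is.all (fun i => PySem.List.pyGet? arr i == PySem.List.pyGet? arr (n - 1 - i)) := by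
  induction is with
  | nil => rfl
  | cons i is ih =>
    simp only [convCheck, List.all_cons, ih]
    by_cases h : PySem.List.pyGet? arr i = PySem.List.pyGet? arr (n - 1 - i)
    · simp [h]
    · simp [h]

theorem palindrome_iff (arr : List Int) :
    (convCheck arr (arr.length : Int)
        (PySem.List.pyRange 0 (PySem.Int.floordiv (arr.length : Int) 2) 1) = true)
      ↔ arr = arr.reverse := by
  rw [convCheck_eq_all, List.all_eq_true]
  have hhalf : PySem.Int.floordiv (arr.length : Int) 2 = ((arr.length / 2 : Nat) : Int) := by
    exact_mod_cast PySem.Int.floordiv_natCast arr.length 2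
  constructor
  · intro h
    have key : ∀ m : Nat, m < arr.length / 2 → arr[m]? = arr[arr.length - 1 - m]? := by
      intro m hm
      have hmem : (m : Int) ∈ PySem.List.pyRange 0 (PySem.Int.floordiv (arr.length : Int) 2) 1 := by
        rw [hhalf, PySem.List.mem_pyRange_one]; omega
      have hbeq := h _ hmem
      rw [beq_iff_eq] at hbeq
      have h2 : ((arr.length : Int) - 1 - m) = ((arr.length - 1 - m : Nat) : Int) := by omega
      rw [h2, PySem.List.pyGet?_natCast, PySem.List.pyGet?_natCast] at hbeq
      exact hbeq
    apply List.ext_getElem?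
    intro j
    by_cases hj : j < arr.length
    · rw [List.getElem?_reverse (by simpa using hj)]
      by_cases hcase : j < arr.length / 2
      · exact key j hcase
      · by_cases hmid : arr.length - 1 - j = j
        · rw [hmid]
        · have hlt : arr.length - 1 - j < arr.length / 2 := by omega
          have hk := key _ hlt
          have heq : arr.length - 1 - (arr.length - 1 - j) = j := by omega
          rw [heq] at hk
          exact hk.symm
    · rw [List.getElem?_eq_none (by omega), List.getElem?_eq_none (by simp; omega)]
  · intro h i hi
    rw [hhalf, PySem.List.mem_pyRange_one] at hi
    rw [beq_iff_eq]
    obtain ⟨m, rfl⟩ : ∃ m : Nat, i = (m : Int) := ⟨i.toNat, by omega⟩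
    have h2 : ((arr.length : Int) - 1 - m) = ((arr.length - 1 - m : Nat) : Int) := by omega
    rw [h2, PySem.List.pyGet?_natCast, PySem.List.pyGet?_natCast]
    conv_lhs => rw [h]
    rw [List.getElem?_reverse (by omega)]

-- ===== VERDICT (by name: the statement is the Claim_ definition above) =====
theorem convK_spec : Claim_equal_convK := by
  intro x k _ hpre
  unfold Spec_convK
  simp only [convK, convK_alt]
  rw [revLoop_eq_foldl, foldl_eq_val_reverse]
  simp only [zero_mul, zero_add]
  rw [Bool.eq_iff_iff, palindrome_iff, beq_iff_eq]
  have hfuel : convMu x ≤ 2 * x.natAbs + 1 := by unfold convMu; split_ifs <;> omega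
  have hval := convVal_digits (2 * x.natAbs + 1) x k hfuel hpre
  constructor
  · intro h
    rw [← h, hval]
  · intro h
    by_cases hx : x = 0
    · subst hx
      simp [convDigits, convVal] at hval ⊢
    · have hk : k ≠ 0 := by unfold Pre_convK at hpre; omega
      have h' := h.trans hval.symm
      have hcanon := fun d hd => convDigits_canonical (2 * x.natAbs + 1) x k d hd
      exact (convVal_inj k hk _ _ (by simp)
        (fun d hd => hcanon d hd)
        (fun d hd => hcanon d (List.mem_reverse.mp hd)) h'.symm)
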